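-- pv_equiv track=rewrite | github.com/rush86999/atom | backend/core/autonomous_documenter_agent.py | _format_changelog_entry
-- ===== SOURCE A (Python) =====
-- from typing import Any, Dict, List, Optional
--
-- def _format_changelog_entry(
--
--     version: str,
--     date: str,
--     changes: List[Dict[str, str]]
-- ) -> str:
--     """
--     Format changelog entry.
--
--     Args:
--         version: Version number
--         date: Date string
--         changes: List of change dicts
--
--     Returns:
--         Formatted changelog entry
--     """
--     lines = [f"## [{version}] - {date}", ""]
--
--     # Group by type
--     grouped = {}
--     for change in changes:
--         change_type = change.get("type", "Added")
--         description = change.get("description", "")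
--
--         if change_type not in grouped:
--             grouped[change_type] = []
--         grouped[change_type].append(description)
--
--     # Generate sections
--     for change_type in ["Added", "Changed", "Fixed", "Removed"]:
--         if change_type in grouped:
--             lines.append(f"### {change_type}")
--             for description in grouped[change_type]:
--                 lines.append(f"- {description}")
--             lines.append("")
--
--     return "\n".join(lines)
-- ===== SOURCE B (Python) =====
-- def _format_changelog_entry(version, date, changes):
--     lines = [f"## [{version}] - {date}", ""]
--     for change_type in ["Added", "Changed", "Fixed", "Removed"]:
--         descs = [c.get("description", "") for c in changes
--                  if c.get("type", "Added") == change_type]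
--         if descs:
--             lines.append(f"### {change_type}")
--             lines.extend(f"- {d}" for d in descs)
--             lines.append("")
--     return "\n".join(lines)
-- ===== Notes on version B (the rewrite author's own statement) =====
-- stated objective: simpler
-- what changed: Replaced the intermediate grouping dict with one filter-and-map per fixed section type (repeated scanning instead of index-then-emit), dropping the dict entirely.
import Mathlib
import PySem

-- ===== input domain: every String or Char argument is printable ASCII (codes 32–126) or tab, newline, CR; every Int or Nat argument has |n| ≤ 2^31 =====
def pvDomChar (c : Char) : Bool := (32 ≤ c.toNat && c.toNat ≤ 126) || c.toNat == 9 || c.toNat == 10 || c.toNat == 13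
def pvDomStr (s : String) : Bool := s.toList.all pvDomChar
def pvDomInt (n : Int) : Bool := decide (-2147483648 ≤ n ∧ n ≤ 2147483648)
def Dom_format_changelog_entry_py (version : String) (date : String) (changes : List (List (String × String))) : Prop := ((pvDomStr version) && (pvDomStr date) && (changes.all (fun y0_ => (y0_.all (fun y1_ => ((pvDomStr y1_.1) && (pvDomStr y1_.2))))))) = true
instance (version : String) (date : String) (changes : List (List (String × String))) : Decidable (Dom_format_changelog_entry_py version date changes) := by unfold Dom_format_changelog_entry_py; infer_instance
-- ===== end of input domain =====

-- B replaces A's grouping dict by one filter-and-map pass per fixed section type (simpler decomposition, same cost).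

-- change.get(k, dflt) on an input dict (assoc list, first match wins)
def cGet (c : List (String × String)) (k dflt : String) : String :=
  (PySem.Dict.mk c).getD k dflt

-- ===== PORT A =====
def format_changelog_entry_py (version : String) (date : String) (changes : List (List (String × String))) : String :=
  let lines0 : List String := ["## [" ++ version ++ "] - " ++ date, ""]
  -- group by type: grouped[change_type].append(description)
  let grouped : PySem.Dict String (List String) :=
    changes.foldl (fun d c =>
      d.modify (cGet c "type" "Added") [] (· ++ [cGet c "description" ""])) PySem.Dict.empty
  -- generate sections
  let lines : List String :=
    ["Added", "Changed", "Fixed", "Removed"].foldl (fun acc t =>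
      if grouped.contains t then
        ((grouped.getD t []).foldl (fun a d => a ++ ["- " ++ d]) (acc ++ ["### " ++ t])) ++ [""]
      else acc) lines0
  PySem.Str.join "\n" lines

-- ===== PORT B =====
def format_changelog_entry_py_alt (version : String) (date : String) (changes : List (List (String × String))) : String :=
  let lines0 : List String := ["## [" ++ version ++ "] - " ++ date, ""]
  let lines : List String :=
    ["Added", "Changed", "Fixed", "Removed"].foldl (fun acc t =>
      let descs := (changes.filter (fun c => cGet c "type" "Added" == t)).map
                     (fun c => cGet c "description" "")
      if descs.isEmpty then acc
      else acc ++ ("### " ++ t) :: (descs.map (fun d => "- " ++ d) ++ [""])) lines0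
  PySem.Str.join "\n" lines

-- ===== PRECONDITION & SPEC =====
def Spec_format_changelog_entry_py (version : String) (date : String) (changes : List (List (String × String))) (out : String) : Prop := out = format_changelog_entry_py_alt version date changes
instance (version : String) (date : String) (changes : List (List (String × String))) (out : String) : Decidable (Spec_format_changelog_entry_py version date changes out) := by unfold Spec_format_changelog_entry_py; infer_instance

-- ===== CLAIM (what is proved, stated in full; the proofs are below) =====
def Claim_equal_format_changelog_entry_py : Prop := ∀ (version : String) (date : String) (changes : List (List (String × String))), Dom_format_changelog_entry_py version date changes → Spec_format_changelog_entry_py version date changes (format_changelog_entry_py version date changes)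

-- ===== LEMMAS AND PROOFS =====

-- the grouped dict's entry at t is exactly B's filtered description list
theorem grouped_getD (changes : List (List (String × String))) (t : String) :
    ((changes.foldl (fun d c =>
        d.modify (cGet c "type" "Added") [] (· ++ [cGet c "description" ""])) PySem.Dict.empty).getD t [])
    = (changes.filter (fun c => cGet c "type" "Added" == t)).map (fun c => cGet c "description" "") := by
  have h := PySem.Dict.getD_foldl_modify_append
      (l := changes.map (fun c => (cGet c "type" "Added", cGet c "description" "")))
      (d := (PySem.Dict.empty : PySem.Dict String (List String))) (c := t)
  simpa [List.foldl_map, List.filter_map, Function.comp] using h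

-- membership of t in the grouped dict ↔ some change has type t
theorem grouped_contains (changes : List (List (String × String))) (t : String) :
    ((changes.foldl (fun d c =>
        d.modify (cGet c "type" "Added") [] (· ++ [cGet c "description" ""])) PySem.Dict.empty).contains t = true)
    ↔ t ∈ changes.map (fun c => cGet c "type" "Added") := by
  rw [PySem.Dict.contains_iff_mem_keys, PySem.Dict.keys_foldl_modify_key]
  simp [PySem.Set.mem_update, PySem.Dict.keys_empty]

theorem section_eq (changes : List (List (String × String))) (t : String) (acc : List String) :
    (if ((changes.foldl (fun d c =>
          d.modify (cGet c "type" "Added") [] (· ++ [cGet c "description" ""])) PySem.Dict.empty).contains t) then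
       ((((changes.foldl (fun d c =>
            d.modify (cGet c "type" "Added") [] (· ++ [cGet c "description" ""])) PySem.Dict.empty).getD t []).foldl
          (fun a d => a ++ ["- " ++ d]) (acc ++ ["### " ++ t])) ++ [""])
     else acc)
    = (let descs := (changes.filter (fun c => cGet c "type" "Added" == t)).map (fun c => cGet c "description" "")
       if descs.isEmpty then acc
       else acc ++ ("### " ++ t) :: (descs.map (fun d => "- " ++ d) ++ [""])) := by
  simp only []
  by_cases h : ((changes.filter (fun c => cGet c "type" "Added" == t)).map
      (fun c => cGet c "description" "")).isEmpty = true
  · -- empty section: the filter is empty, so t is in no change's type and contains is false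
    have hfil : changes.filter (fun c => cGet c "type" "Added" == t) = [] := by
      simpa [List.isEmpty_iff] using h
    have hnot : t ∉ changes.map (fun c => cGet c "type" "Added") := by
      intro hm
      rcases List.mem_map.mp hm with ⟨c, hc, hct⟩
      have : c ∈ changes.filter (fun c => cGet c "type" "Added" == t) :=
        List.mem_filter.mpr ⟨hc, by simp [hct]⟩
      simp [hfil] at this
    have hcf : ((changes.foldl (fun d c =>
        d.modify (cGet c "type" "Added") [] (· ++ [cGet c "description" ""])) PySem.Dict.empty).contains t) = false := by
      rcases Bool.eq_false_or_eq_true ((changes.foldl (fun d c =>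
        d.modify (cGet c "type" "Added") [] (· ++ [cGet c "description" ""])) PySem.Dict.empty).contains t) with h' | h'
      · exact absurd ((grouped_contains changes t).mp h') hnot
      · exact h' 
    simp [hcf, h]
  · -- non-empty section
    have hcon : ((changes.foldl (fun d c =>
        d.modify (cGet c "type" "Added") [] (· ++ [cGet c "description" ""])) PySem.Dict.empty).contains t) = true := by
      have hne : changes.filter (fun c => cGet c "type" "Added" == t) ≠ [] := by
        intro hnil
        exact h (by simp [hnil])
      obtain ⟨c, hc⟩ := List.exists_mem_of_ne_nil _ hne
      obtain ⟨hcm, hct⟩ := List.mem_filter.mp hc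
      exact (grouped_contains changes t).mpr (List.mem_map.mpr ⟨c, hcm, by simpa using hct⟩)
    rw [if_pos hcon, grouped_getD, PySem.List.foldl_append_singleton_eq_map]
    simp [h]

-- ===== VERDICT (by name: the statement is the Claim_ definition above) =====
theorem format_changelog_entry_py_spec : Claim_equal_format_changelog_entry_py := by
  intro version date changes _
  unfold Spec_format_changelog_entry_py format_changelog_entry_py format_changelog_entry_py_alt
  simp only [List.foldl]
  rw [section_eq, section_eq, section_eq, section_eq]
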